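-- pv_equiv track=rewrite | github.com/Edmaroff/Advanced_Python-Lesson2 | script.py | create_dict_person
-- ===== SOURCE A (Python) =====
-- def create_dict_person(contacts_list):
--     unique_persons = {}
--     duplicate_person = {}
--     for data in contacts_list[1:]:
--         if unique_persons.get(' '.join(data[0:2])) is None:
--             unique_persons[' '.join(data[0:2])] = data[2:]
--         else:
--             duplicate_person[' '.join(data[0:2])] = data[2:]
--     return [unique_persons, duplicate_person]
-- ===== SOURCE B (Python) =====
-- def create_dict_person(contacts_list):
--     groups = {}
--     dup_order = []
--     for row in contacts_list[1:]:
--         key = ' '.join(row[:2])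
--         bucket = groups.setdefault(key, [])
--         bucket.append(row[2:])
--         if len(bucket) == 2:
--             dup_order.append(key)
--     unique = {k: v[0] for k, v in groups.items()}
--     duplicate = {k: groups[k][-1] for k in dup_order}
--     return [unique, duplicate]
-- ===== Notes on version B (the rewrite author's own statement) =====
-- stated objective: alternative
-- what changed: B groups all rows by name into lists of tails first (setdefault/append, recording when a key becomes duplicate), then builds the unique and duplicate dicts from the grouped buckets in a second pass, instead of classifying each row inline against the unique dict during one scan.
import Mathlib
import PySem

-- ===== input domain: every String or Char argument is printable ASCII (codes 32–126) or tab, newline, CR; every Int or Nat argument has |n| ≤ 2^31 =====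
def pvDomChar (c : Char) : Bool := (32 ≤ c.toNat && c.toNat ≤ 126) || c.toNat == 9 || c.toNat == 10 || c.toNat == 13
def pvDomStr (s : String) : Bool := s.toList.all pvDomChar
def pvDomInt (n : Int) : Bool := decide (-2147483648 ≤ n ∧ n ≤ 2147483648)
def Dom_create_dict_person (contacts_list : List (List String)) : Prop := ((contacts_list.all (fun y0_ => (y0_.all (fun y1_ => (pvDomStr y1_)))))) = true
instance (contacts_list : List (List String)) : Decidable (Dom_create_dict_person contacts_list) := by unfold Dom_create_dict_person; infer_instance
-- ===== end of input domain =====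

-- B groups rows by name into buckets first, then derives the unique/duplicate dicts in a second pass (alternative decomposition, same cost).


-- ===== PORT A =====
-- ' '.join(data[0:2])
def pvKey (data : List String) : String :=
  PySem.Str.join " " (PySem.List.slice data (some 0) (some 2))

-- data[2:]
def pvTail (data : List String) : List String :=
  PySem.List.slice data (some 2) none

-- the body of A's loop: first occurrence goes to unique_persons, later ones overwrite in duplicate_person
def stepA (st : PySem.Dict String (List String) × PySem.Dict String (List String))
    (data : List String) : PySem.Dict String (List String) × PySem.Dict String (List String) :=
  match st.1.get? (pvKey data) with
  | none => (st.1.insert (pvKey data) (pvTail data), st.2)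
  | some _ => (st.1, st.2.insert (pvKey data) (pvTail data))

def create_dict_person (contacts_list : List (List String)) : List (List (String × List String)) :=
  let r := (PySem.List.slice contacts_list (some 1) none).foldl stepA (PySem.Dict.empty, PySem.Dict.empty)
  [r.1.items, r.2.items]

-- ===== PORT B =====
-- B's loop: groups.setdefault(key, []).append(row[2:]); record key in dup_order when its bucket reaches length 2
def stepB (st : PySem.Dict String (List (List String)) × List String)
    (data : List String) : PySem.Dict String (List (List String)) × List String :=
  let bucket := st.1.getD (pvKey data) [] ++ [pvTail data]
  (st.1.insert (pvKey data) bucket,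
   if bucket.length = 2 then st.2 ++ [pvKey data] else st.2)

-- buckets are nonempty by construction, so v[0] is headD [] and v[-1] is getLastD []
def create_dict_person_alt (contacts_list : List (List String)) : List (List (String × List String)) :=
  let r := (PySem.List.slice contacts_list (some 1) none).foldl stepB (PySem.Dict.empty, [])
  [r.1.items.map (fun p => (p.1, p.2.headD [])),
   r.2.map (fun k => (k, (r.1.getD k []).getLastD []))]

-- ===== PRECONDITION & SPEC =====
def Spec_create_dict_person (contacts_list : List (List String)) (out : List (List (String × List String))) : Prop := out = create_dict_person_alt contacts_list
instance (contacts_list : List (List String)) (out : List (List (String × List String))) : Decidable (Spec_create_dict_person contacts_list out) := by unfold Spec_create_dict_person; infer_instance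

-- ===== CLAIM (what is proved, stated in full; the proofs are below) =====
def Claim_equal_create_dict_person : Prop := ∀ (contacts_list : List (List String)), Dom_create_dict_person contacts_list → Spec_create_dict_person contacts_list (create_dict_person contacts_list)

-- ===== LEMMAS AND PROOFS =====

-- The relation between A's state (u, d) and B's state (g, o) maintained by the loops.
def pvInv (u d : PySem.Dict String (List String))
    (g : PySem.Dict String (List (List String))) (o : List String) : Prop :=
  g.keys.Nodup ∧
  u.items = g.items.map (fun p => (p.1, p.2.headD [])) ∧
  d.items = o.map (fun k => (k, (g.getD k []).getLastD [])) ∧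
  (∀ k, k ∈ o ↔ 2 ≤ (g.getD k []).length) ∧
  (∀ p ∈ g.items, p.2 ≠ [])

theorem pvInv_init : pvInv PySem.Dict.empty PySem.Dict.empty PySem.Dict.empty [] := by
  refine ⟨by simp [PySem.Dict.keys, PySem.Dict.empty], by simp [PySem.Dict.empty], by simp [PySem.Dict.empty], ?_, ?_⟩ <;>
    simp [PySem.Dict.empty, PySem.Dict.getD, PySem.Dict.get?]

theorem pvInv_step (u d : PySem.Dict String (List String))
    (g : PySem.Dict String (List (List String))) (o : List String)
    (h : pvInv u d g o) (data : List String) :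
    pvInv (stepA (u, d) data).1 (stepA (u, d) data).2 (stepB (g, o) data).1 (stepB (g, o) data).2 := by
  obtain ⟨hnd, hu, hd, ho, hne⟩ := h
  simp only [stepA, stepB]
  generalize pvKey data = k
  generalize pvTail data = t
  have hkeys : u.keys = g.keys := by
    simp only [PySem.Dict.keys, hu, List.map_map]; rfl
  by_cases hmem : k ∈ g.keys
  · -- later occurrence
    obtain ⟨v, hv⟩ : ∃ v, u.get? k = some v := by
      cases h' : u.get? k with
      | none => exact absurd ((PySem.Dict.get?_eq_none_iff_not_mem_keys u k).mp h') (by simp [hkeys, hmem])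
      | some v => exact ⟨v, rfl⟩
    obtain ⟨b, hb⟩ : ∃ b, g.get? k = some b := by
      cases h' : g.get? k with
      | none => exact absurd ((PySem.Dict.get?_eq_none_iff_not_mem_keys g k).mp h') (by simp [hmem])
      | some b => exact ⟨b, rfl⟩
    have hgd : g.getD k [] = b := PySem.Dict.getD_of_get?_eq_some g [] hb
    have hbmem : (k, b) ∈ g.items := PySem.Dict.mem_items_of_get?_eq_some g hb
    have hbne : b ≠ [] := hne (k, b) hbmem
    have hblen : 1 ≤ b.length := List.length_pos_iff.mpr hbne
    have hgc : g.contains k = true := by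
      rw [PySem.Dict.contains_eq_decide_mem_keys]; simp [hmem]
    have hdkeys : d.keys = o := by
      simp only [PySem.Dict.keys, hd, List.map_map]; simp [Function.comp_def]
    simp only [hv, hgd]
    refine ⟨PySem.Dict.nodup_keys_insert _ _ _ hnd, ?_, ?_, ?_, ?_⟩
    · rw [PySem.Dict.items_insert_of_contains _ _ hgc, List.map_map, hu]
      apply List.map_eq_map_iff.mpr
      intro p hp
      by_cases hpk : p.1 = k
      · have hp2 : g.get? k = some p.2 := by
          have : (k, p.2) ∈ g.items := by rw [← hpk]; exact hp
          exact PySem.Dict.get?_of_mem_items g this hnd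
        have hpb : p.2 = b := by rw [hp2] at hb; exact Option.some.inj hb
        obtain ⟨x, hx⟩ : ∃ x, b.head? = some x := by
          cases b with
          | nil => exact absurd rfl hbne
          | cons y ys => exact ⟨y, rfl⟩
        simp [Function.comp, hpk, hpb, hx]
      · simp [Function.comp, hpk]
    · by_cases hb1 : b.length = 1
      · have hif : (b ++ [t]).length = 2 := by simp [hb1]
        have hko : k ∉ o := fun hin => by
          have := (ho k).mp hin; rw [hgd] at this; omega
        have hdc : d.contains k = false := by
          rw [PySem.Dict.contains_eq_decide_mem_keys]; simp [hdkeys, hko]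
        rw [if_pos hif, PySem.Dict.items_insert_of_not_contains _ _ hdc, hd, List.map_append]
        congr 1
        · apply List.map_eq_map_iff.mpr
          intro a ha
          have hak : a ≠ k := fun e => hko (e ▸ ha)
          rw [PySem.Dict.getD_insert]; simp [hak]
        · simp [PySem.Dict.getD_insert_self]
      · have hif : (b ++ [t]).length ≠ 2 := by simp; omega
        have hko : k ∈ o := (ho k).mpr (by rw [hgd]; omega)
        have hdc : d.contains k = true := by
          rw [PySem.Dict.contains_eq_decide_mem_keys]; simp [hdkeys, hko]
        rw [if_neg hif, PySem.Dict.items_insert_of_contains _ _ hdc, hd, List.map_map]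
        apply List.map_eq_map_iff.mpr
        intro a ha
        by_cases hak : a = k
        · simp [Function.comp, hak, PySem.Dict.getD_insert_self]
        · rw [PySem.Dict.getD_insert]; simp [Function.comp, hak]
    · intro k'
      rw [PySem.Dict.getD_insert]
      by_cases hk' : k' = k
      · rw [if_pos hk', hk']
        constructor
        · intro _; simp; omega
        · intro _
          split_ifs with hc
          · simp
          · exact (ho k).mpr (by rw [hgd]; simp at hc; omega)
      · rw [if_neg hk']
        have : k' ∈ (if (b ++ [t]).length = 2 then o ++ [k] else o) ↔ k' ∈ o := by
          split_ifs <;> simp [hk']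
        rw [this, ho k']
    · intro p hp
      rcases (PySem.Dict.mem_items_insert _ _ _ _).mp hp with hpe | ⟨hpi, _⟩
      · rw [hpe]; simp
      · exact hne p hpi
  · -- first occurrence
    have hgetu : u.get? k = none :=
      (PySem.Dict.get?_eq_none_iff_not_mem_keys u k).mpr (by rw [hkeys]; exact hmem)
    have hgc : g.contains k = false := by
      rw [PySem.Dict.contains_eq_decide_mem_keys]; simp [hmem]
    have huc : u.contains k = false := by
      rw [PySem.Dict.contains_eq_decide_mem_keys]; simp [hkeys, hmem]
    have hgd : g.getD k [] = [] := by
      rw [PySem.Dict.getD_eq_get?_getD, (PySem.Dict.get?_eq_none_iff_not_mem_keys g k).mpr hmem]; rfl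
    simp only [hgetu, hgd, List.nil_append]
    have hif : ¬ ([t].length = 2) := by simp
    rw [if_neg hif]
    refine ⟨PySem.Dict.nodup_keys_insert _ _ _ hnd, ?_, ?_, ?_, ?_⟩
    · rw [PySem.Dict.items_insert_of_not_contains _ _ huc,
        PySem.Dict.items_insert_of_not_contains _ _ hgc, List.map_append, hu]
      rfl
    · rw [hd]
      apply List.map_eq_map_iff.mpr
      intro a ha
      have hak : a ≠ k := fun e => by
        have := (ho a).mp ha; rw [e, hgd] at this; simp at this
      rw [PySem.Dict.getD_insert]; simp [hak]
    · intro k'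
      rw [PySem.Dict.getD_insert]
      by_cases hk' : k' = k
      · rw [if_pos hk', hk']
        simp only [List.length_singleton]
        constructor
        · intro hin; have := (ho k).mp hin; rw [hgd] at this; simp at this
        · intro hl; exact absurd hl (by omega)
      · rw [if_neg hk']; exact ho k'
    · intro p hp
      rcases (PySem.Dict.mem_items_insert _ _ _ _).mp hp with hpe | ⟨hpi, _⟩
      · rw [hpe]; simp
      · exact hne p hpi

theorem pvInv_foldl (xs : List (List String)) :
    ∀ (u d : PySem.Dict String (List String))
      (g : PySem.Dict String (List (List String))) (o : List String),
      pvInv u d g o →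
      pvInv (xs.foldl stepA (u, d)).1 (xs.foldl stepA (u, d)).2
            (xs.foldl stepB (g, o)).1 (xs.foldl stepB (g, o)).2 := by
  induction xs with
  | nil => intro u d g o h; exact h
  | cons x t ih =>
    intro u d g o h
    have h' := pvInv_step u d g o h x
    simpa [List.foldl] using ih (stepA (u, d) x).1 (stepA (u, d) x).2
      (stepB (g, o) x).1 (stepB (g, o) x).2 h'

-- ===== VERDICT (by name: the statement is the Claim_ definition above) =====
theorem create_dict_person_spec : Claim_equal_create_dict_person := by
  intro contacts_list _
  unfold Spec_create_dict_person create_dict_person create_dict_person_alt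
  have h := pvInv_foldl (PySem.List.slice contacts_list (some 1) none)
    PySem.Dict.empty PySem.Dict.empty PySem.Dict.empty [] pvInv_init
  obtain ⟨-, h2, h3, -, -⟩ := h
  simp only []
  rw [h2, h3]
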